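-- pv_equiv track=rewrite | github.com/JiahuaDong/CIFC | inference.py | bind_concept_prompt
-- ===== SOURCE A (Python) =====
-- def bind_concept_prompt(prompts, new_concept_cfg):
--     if isinstance(prompts, str):
--         prompts = [prompts]
--     new_prompts = []
--     for prompt in prompts:
--         prompt = [prompt] * 16
--         for concept_name, new_token_cfg in new_concept_cfg.items():
--             prompt = [
--                 p.replace(concept_name, new_name) for p, new_name in zip(prompt, new_token_cfg['concept_token_names'])
--             ]
--         new_prompts.extend(prompt)
--     return new_prompts
-- ===== SOURCE B (Python) =====
-- def _apply_subs(p, sub):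
--     if not sub:
--         return p
--     (name, tok), rest = sub[0], sub[1:]
--     return _apply_subs(p.replace(name, tok), rest)
--
--
-- def bind_concept_prompt(prompts, new_concept_cfg):
--     if isinstance(prompts, str):
--         prompts = [prompts]
--     if new_concept_cfg:
--         names = list(new_concept_cfg)
--         rows = zip(*(cfg['concept_token_names'][:16]
--                      for cfg in new_concept_cfg.values()))
--         subs = [list(zip(names, row)) for row in rows]
--     else:
--         subs = [[]] * 16
--     return [_apply_subs(p, sub) for p in prompts for sub in subs]
-- ===== Notes on version B (the rewrite author's own statement) =====
-- stated objective: alternative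
-- what changed: B is staged: it first transposes the 16-truncated token-name lists into per-variant substitution tables (Python zip(*...), which yields exactly min(16, shortest list) rows), then maps a small recursive table-applier over the prompts; A instead keeps a 16-wide list of partial prompts and rewrites it once per concept.
-- outside the precondition, e.g. on bind_concept_prompt([], {'sks': {'wrong_key': []}}): A returns [], B raises KeyError
import Mathlib
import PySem

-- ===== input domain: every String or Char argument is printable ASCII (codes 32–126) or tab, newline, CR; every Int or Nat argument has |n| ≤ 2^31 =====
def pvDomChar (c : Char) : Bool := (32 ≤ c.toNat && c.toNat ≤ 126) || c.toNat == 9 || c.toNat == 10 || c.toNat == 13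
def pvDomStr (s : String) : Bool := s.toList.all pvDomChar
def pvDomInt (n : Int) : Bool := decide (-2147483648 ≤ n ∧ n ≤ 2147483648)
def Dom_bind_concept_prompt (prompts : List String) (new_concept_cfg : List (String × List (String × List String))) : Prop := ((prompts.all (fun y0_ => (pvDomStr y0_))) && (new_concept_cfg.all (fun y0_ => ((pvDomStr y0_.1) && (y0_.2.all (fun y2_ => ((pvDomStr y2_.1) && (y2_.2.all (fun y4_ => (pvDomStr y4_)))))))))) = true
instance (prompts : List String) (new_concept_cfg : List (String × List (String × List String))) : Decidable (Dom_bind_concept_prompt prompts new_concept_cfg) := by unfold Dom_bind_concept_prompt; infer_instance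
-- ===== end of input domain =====

-- B stages the work: it transposes the (16-truncated) token-name lists into per-variant
-- substitution tables once, then maps a recursive table-applier over the prompts ('alternative').

-- shared helper: new_token_cfg['concept_token_names'] (first-match dict lookup; [] never reached inside Pre_)
def pvTok (cfg : List (String × List String)) : List String :=
  ((PySem.Dict.mk cfg).get? "concept_token_names").getD []

-- ===== PORT A =====
def bind_concept_prompt (prompts : List String) (new_concept_cfg : List (String × List (String × List String))) : List String :=
  prompts.foldl (fun new_prompts prompt =>
    new_prompts ++
      new_concept_cfg.foldl
        (fun pr c => List.zipWith (fun p new_name => PySem.Str.replace p c.1 new_name) pr (pvTok c.2))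
        (List.replicate 16 prompt)) []

-- ===== PORT B =====
-- _apply_subs from Source B: structural recursion over the substitution table
def pvApplySubs (p : String) : List (String × String) → String
  | [] => p
  | s :: rest => pvApplySubs (PySem.Str.replace p s.1 s.2) rest

-- zip(*lists): rows until the shortest list runs out (exact Python zip semantics)
def pyZipN : List (List String) → List (List String)
  | [] => []
  | a :: t =>
    if _h : ((a :: t).all (fun l => !l.isEmpty)) = true then
      ((a :: t).map (fun l => l.headD "")) :: pyZipN ((a :: t).map List.tail)
    else []
termination_by ls => (ls.headD []).length
decreasing_by
  simp only [List.all_cons, Bool.and_eq_true, Bool.not_eq_eq_eq_not, Bool.not_true] at _h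
  cases a with
  | nil => simp [List.isEmpty_nil] at _h
  | cons x xs => simp

def bind_concept_prompt_alt (prompts : List String) (new_concept_cfg : List (String × List (String × List String))) : List String :=
  let subs :=
    if new_concept_cfg.isEmpty then List.replicate 16 ([] : List (String × String))
    else
      let names := new_concept_cfg.map Prod.fst
      -- cfg['concept_token_names'][:16] = take 16 (nonnegative slice bound, exact)
      (pyZipN (new_concept_cfg.map (fun c => (pvTok c.2).take 16))).map (fun row => names.zip row)
  prompts.flatMap (fun p => subs.map (fun sub => pvApplySubs p sub))

-- ===== PRECONDITION & SPEC =====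
-- Pre_ excludes inputs where some concept's cfg dict lacks 'concept_token_names': there A raises KeyError for any
-- nonempty prompts, and with empty prompts A returns [] untouched while B's eager table build still raises KeyError.
def Pre_bind_concept_prompt (prompts : List String) (new_concept_cfg : List (String × List (String × List String))) : Prop :=
  ∀ c ∈ new_concept_cfg, "concept_token_names" ∈ c.2.map Prod.fst
instance (prompts : List String) (new_concept_cfg : List (String × List (String × List String))) : Decidable (Pre_bind_concept_prompt prompts new_concept_cfg) := by unfold Pre_bind_concept_prompt; infer_instance
def pvWitness_bind_concept_prompt : List String × (List (String × List (String × List String))) :=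
  (["a photo of sks dog"], [("sks", [("concept_token_names", ["<t1>", "<t2>"])])])

def Spec_bind_concept_prompt (prompts : List String) (new_concept_cfg : List (String × List (String × List String))) (out : List String) : Prop := out = bind_concept_prompt_alt prompts new_concept_cfg
instance (prompts : List String) (new_concept_cfg : List (String × List (String × List String))) (out : List String) : Decidable (Spec_bind_concept_prompt prompts new_concept_cfg out) := by unfold Spec_bind_concept_prompt; infer_instance

-- ===== CLAIM (what is proved, stated in full; the proofs are below) =====
def Claim_equal_bind_concept_prompt : Prop := ∀ (prompts : List String) (new_concept_cfg : List (String × List (String × List String))), Dom_bind_concept_prompt prompts new_concept_cfg → Pre_bind_concept_prompt prompts new_concept_cfg → Spec_bind_concept_prompt prompts new_concept_cfg (bind_concept_prompt prompts new_concept_cfg)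

-- ===== LEMMAS AND PROOFS =====

lemma pv_self_eq_range_map (l : List String) :
    l = (List.range l.length).map (fun i => l.getD i "") := by
  apply List.ext_getElem
  · simp
  · intro i h1 h2
    simp [List.getD_eq_getElem?_getD, h1]

lemma pv_foldl_min_le (ns : List Nat) (m : Nat) : List.foldl min m ns ≤ m := by
  induction ns generalizing m with
  | nil => simp
  | cons a t ih => exact le_trans (ih _) (min_le_left _ _)

lemma pv_foldl_min_le_mem {n : Nat} {ns : List Nat} (h : n ∈ ns) (m : Nat) :
    List.foldl min m ns ≤ n := by
  induction ns generalizing m with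
  | nil => cases h
  | cons a t ih =>
    rcases List.mem_cons.mp h with rfl | h'
    · exact le_trans (pv_foldl_min_le t _) (min_le_right _ _)
    · exact ih h' _

-- characterization of A's inner concept sweep as a per-index map
lemma pv_inner (cfgs : List (String × List (String × List String))) (l : List String) :
    cfgs.foldl
      (fun pr c => List.zipWith (fun p new_name => PySem.Str.replace p c.1 new_name) pr (pvTok c.2)) l
    = (List.range (List.foldl min l.length (cfgs.map (fun c => (pvTok c.2).length)))).map
        (fun i => cfgs.foldl (fun p c => PySem.Str.replace p c.1 ((pvTok c.2).getD i "")) (l.getD i "")) := by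
  induction cfgs generalizing l with
  | nil => simpa using pv_self_eq_range_map l
  | cons c t ih =>
    simp only [List.foldl_cons, List.map_cons]
    rw [ih]
    have hlen : (List.zipWith (fun p new_name => PySem.Str.replace p c.1 new_name) l (pvTok c.2)).length
        = min l.length (pvTok c.2).length := by simp
    rw [hlen]
    apply List.map_congr_left
    intro i hi
    have hiN := List.mem_range.mp hi
    have hle := pv_foldl_min_le (t.map (fun c => (pvTok c.2).length)) (min l.length (pvTok c.2).length)
    have hil : i < l.length := lt_of_lt_of_le hiN (le_trans hle (min_le_left _ _))
    have hit : i < (pvTok c.2).length := lt_of_lt_of_le hiN (le_trans hle (min_le_right _ _))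
    congr 1
    rw [List.getD_eq_getElem _ _ (by simpa [hlen] using lt_of_lt_of_le hiN hle),
        List.getD_eq_getElem _ _ hil, List.getD_eq_getElem _ _ hit]
    simp

-- minimum length of a nonempty family, as pyZipN discovers it
def pvMinLen : List (List String) → Nat
  | [] => 0
  | a :: t => t.foldl (fun m l => min m l.length) a.length

lemma pv_foldl_minlen (t : List (List String)) (m : Nat) :
    t.foldl (fun m l => min m l.length) m = List.foldl min m (t.map List.length) := by
  induction t generalizing m with
  | nil => rfl
  | cons a s ih => simp [List.foldl_cons, ih]

-- characterization of pyZipN as a per-index map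
lemma pv_foldl_min_pred (ns : List Nat) (m : Nat) (hm : 1 ≤ m) (h : ∀ n ∈ ns, 1 ≤ n) :
    List.foldl min (m - 1) (ns.map (· - 1)) = List.foldl min m ns - 1 := by
  induction ns generalizing m with
  | nil => simp
  | cons n s ih =>
    simp only [List.map_cons, List.foldl_cons]
    have hn : 1 ≤ n := h n (by simp)
    rw [show min (m - 1) (n - 1) = min m n - 1 from by omega]
    exact ih _ (by omega) (fun x hx => h x (by simp [hx]))

lemma pv_foldl_min_pos (ns : List Nat) (m : Nat) (hm : 1 ≤ m) (h : ∀ n ∈ ns, 1 ≤ n) :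
    1 ≤ List.foldl min m ns := by
  induction ns generalizing m with
  | nil => simpa using hm
  | cons n s ih =>
    simp only [List.foldl_cons]
    have hn : 1 ≤ n := h n (by simp)
    exact ih _ (by omega) (fun x hx => h x (by simp [hx]))

lemma pv_pyZipN_eq (ls : List (List String)) :
    pyZipN ls = (List.range (pvMinLen ls)).map (fun i => ls.map (fun l => l.getD i "")) := by
  induction ls using pyZipN.induct with
  | case1 => simp [pyZipN, pvMinLen]
  | case2 a t h ih =>
    rw [pyZipN]
    simp only [h, dif_pos]
    have hne : ∀ l ∈ a :: t, l ≠ [] := by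
      intro l hl
      have := List.all_eq_true.mp h l hl
      simpa [List.isEmpty_iff] using this
    have ha : a ≠ [] := hne a (by simp)
    have ha1 : 1 ≤ a.length := List.length_pos_of_ne_nil ha
    have hone : ∀ n ∈ t.map List.length, 1 ≤ n := by
      intro n hn
      obtain ⟨l, hl, rfl⟩ := List.mem_map.mp hn
      exact List.length_pos_of_ne_nil (hne l (List.mem_cons_of_mem _ hl))
    have hmaplen : (t.map List.tail).map List.length = (t.map List.length).map (· - 1) := by
      simp only [List.map_map]
      apply List.map_congr_left
      intro l _
      simp [List.length_tail]
    have hmin' : pvMinLen ((a :: t).map List.tail) = pvMinLen (a :: t) - 1 := by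
      simp only [List.map_cons, pvMinLen, pv_foldl_minlen, hmaplen, List.length_tail]
      exact pv_foldl_min_pred _ _ ha1 hone
    have hpos : 1 ≤ pvMinLen (a :: t) := by
      simp only [pvMinLen, pv_foldl_minlen]
      exact pv_foldl_min_pos _ _ ha1 hone
    have hmin : pvMinLen (a :: t) = pvMinLen ((a :: t).map List.tail) + 1 := by omega
    rw [ih, hmin, List.range_succ_eq_map]
    simp only [List.map_cons, List.map_map]
    congr 1
    · congr 1
      · cases a with
 | nil => exact absurd rfl ha
 | cons x xs => simp
      · apply List.map_congr_left
        intro l hl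
        have := hne l (List.mem_cons_of_mem _ hl)
        cases l with
        | nil => exact absurd rfl this
        | cons x xs => simp
    · apply List.map_congr_left
      intro i _
      simp only [Function.comp]
      congr 1
      · cases a with
 | nil => exact absurd rfl ha
 | cons x xs => simp
      · apply List.map_congr_left
        intro l hl
        have := hne l (List.mem_cons_of_mem _ hl)
        cases l with
        | nil => exact absurd rfl this
        | cons x xs => simp [Function.comp]
  | case3 a t h =>
    rw [pyZipN]
    simp only [h]
    have : ∃ l ∈ a :: t, l = [] := by
      by_contra hc
      push Not at hc
      exact h (List.all_eq_true.mpr (fun l hl => by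
        simpa [List.isEmpty_iff] using hc l hl))
    obtain ⟨l, hl, rfl⟩ := this
    have h0 : pvMinLen (a :: t) = 0 := by
      rcases List.mem_cons.mp hl with rfl | hl'
      · simp only [pvMinLen, pv_foldl_minlen]
        have := pv_foldl_min_le (t.map List.length) ([] : List String).length
        simpa using this
      · simp only [pvMinLen, pv_foldl_minlen]
        have hmem : (0 : Nat) ∈ t.map List.length := List.mem_map.mpr ⟨[], hl', rfl⟩
        have := pv_foldl_min_le_mem hmem a.length
        omega
    simp [h0]

-- applying a table built as a map over cfgs = A's sequential replace fold
lemma pv_apply_map (cfgs : List (String × List (String × List String)))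
    (f : String × List (String × List String) → String) (p : String) :
    pvApplySubs p (cfgs.map (fun c => (c.1, f c)))
      = cfgs.foldl (fun p c => PySem.Str.replace p c.1 (f c)) p := by
  induction cfgs generalizing p with
  | nil => rfl
  | cons c t ih => simp [pvApplySubs, List.foldl_cons, ih]

lemma pv_zip_map (cfgs : List (String × List (String × List String)))
    (f : String × List (String × List String) → String) :
    (cfgs.map Prod.fst).zip (cfgs.map f) = cfgs.map (fun c => (c.1, f c)) := by
  induction cfgs with
  | nil => rfl
  | cons c t ih => simp [List.zip_cons_cons, ih]

lemma pv_min16 (cfgs : List (String × List (String × List String))) (hne : cfgs ≠ []) :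
    pvMinLen (cfgs.map (fun c => (pvTok c.2).take 16))
      = List.foldl min 16 (cfgs.map (fun c => (pvTok c.2).length)) := by
  cases cfgs with
  | nil => exact absurd rfl hne
  | cons c t =>
    simp only [pvMinLen, List.map_cons, pv_foldl_minlen, List.map_map, List.foldl_cons]
    have hmap : t.map (List.length ∘ fun c => (pvTok c.2).take 16) = t.map (fun c => min 16 (pvTok c.2).length) := by
      apply List.map_congr_left; intro x _; simp [Function.comp]
    simp only [List.length_take]
    rw [hmap]
    have : ∀ (m : Nat) (ns : List Nat), m ≤ 16 →
        List.foldl min m (ns.map (fun n => min 16 n)) = List.foldl min m ns := by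
      intro m ns
      induction ns generalizing m with
      | nil => simp
      | cons n s ihs =>
        intro hm
        simp only [List.map_cons, List.foldl_cons]
        rw [show min m (min 16 n) = min m n from by omega]
        exact ihs _ (by omega)
    rw [show t.map (fun c => min 16 (pvTok c.2).length)
          = (t.map (fun c => (pvTok c.2).length)).map (fun n => min 16 n) from by simp [List.map_map],
        this _ _ (by omega)]

theorem bind_concept_prompt_spec : Claim_equal_bind_concept_prompt := by
  intro prompts new_concept_cfg _ _
  unfold Spec_bind_concept_prompt bind_concept_prompt bind_concept_prompt_alt
  rw [PySem.List.foldl_append_eq_flatMap]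
  simp only [List.nil_append]
  congr 1
  funext prompt
  rw [pv_inner]
  simp only [List.length_replicate]
  cases hcfg : new_concept_cfg with
  | nil => simp [pvApplySubs, List.range_succ]
  | cons c t =>
    rw [← hcfg]
    have hne : new_concept_cfg ≠ [] := by rw [hcfg]; simp
    have hie : new_concept_cfg.isEmpty = false := by simp [hne]
    simp only [hie, Bool.false_eq_true, if_false, List.map_map]
    rw [pv_pyZipN_eq, pv_min16 _ hne, List.map_map]
    apply List.map_congr_left
    intro i hi
    have hiN := List.mem_range.mp hi
    have h16 : i < 16 := lt_of_lt_of_le hiN (pv_foldl_min_le _ _)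
    simp only [Function.comp, List.map_map]
    have hrow : new_concept_cfg.map ((fun l => l.getD i "") ∘ fun c => (pvTok c.2).take 16)
        = new_concept_cfg.map (fun c => (pvTok c.2).getD i "") := by
      apply List.map_congr_left
      intro c hc
      simp only [Function.comp_apply]
      have hlen : i < (pvTok c.2).length := by
        have := pv_foldl_min_le (new_concept_cfg.map (fun c => (pvTok c.2).length)) 16
        -- i < foldl min ≤ each element's length: extract via membership
        have hmem : (pvTok c.2).length ∈ new_concept_cfg.map (fun c => (pvTok c.2).length) :=
          List.mem_map.mpr ⟨c, hc, rfl⟩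
        have hle2 : List.foldl min 16 (new_concept_cfg.map (fun c => (pvTok c.2).length)) ≤ (pvTok c.2).length := by
          exact pv_foldl_min_le_mem hmem 16
        omega
      rw [List.getD_eq_getElem _ _ (by simp; omega), List.getD_eq_getElem _ _ hlen]
      simp
    rw [hrow, pv_zip_map, pv_apply_map]
    congr 1
    rw [List.getD_eq_getElem _ _ (by simpa using h16)]
    interval_cases i <;> rfl
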